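-- pv_equiv track=rewrite | github.com/JulianCamacho0/Complex_numbers | Calculadora_complex.py | producto_interno
-- ===== SOURCE A (Python) =====
-- def suma(cu, cd):
--     """(list, list) -> list
--     Suma entre dos numero complejos"""
--
--     a = cu[0] + cd[0]
--     b = cu[1] + cd[1]
--     r= [a,b]
--
--     return r
--
-- def multi(cu, cd):
--     """(list, list) -> list
--     Producto entre dos numeros complejos"""
--
--     a = cu[0]*cd[0] - cu[1]*cd[1]
--     b =  cu[0]*cd[1] + cu[1]*cd[0]
--     r = [a,b]
--
--     return r
--
-- def conju(c):
--     """(list) -> list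
--     Conjugado de un número complejo"""
--
--     r = [c[0], c[1] * -1]
--
--     return r
--
-- def producto_interno(v_one, v_two):
--     """(list, list) -> list
--     Calcula el producto interno de dos vectores"""
--
--     r = [0,0]
--     conju_v_one = []
--     for i in v_one:
--         conju_v_one = conju_v_one + [conju(i)]
--     for j in range(len(v_one)):
--         r = suma( r,multi(conju_v_one[j], v_two[j]) )
--
--
--     return r
-- ===== SOURCE B (Python) =====
-- def producto_interno(v_one, v_two):
--     """(list, list) -> list
--     Calcula el producto interno de dos vectores"""
--     pairs = list(zip(v_one, v_two))
--     real = sum(x[0] * y[0] + x[1] * y[1] for x, y in pairs)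
--     imag = sum(x[0] * y[1] - x[1] * y[0] for x, y in pairs)
--     return [real, imag]
-- ===== Notes on version B (the rewrite author's own statement) =====
-- stated objective: idiomatic
-- what changed: Replaces A's two staged loops (building a conjugate list by repeated list concatenation, then an indexed fold through suma/multi complex-arithmetic helpers) by zip-pairing the vectors once and reducing each component with a sum() over a comprehension, with no helpers, no indices and no intermediate conjugate list.
import Mathlib
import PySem

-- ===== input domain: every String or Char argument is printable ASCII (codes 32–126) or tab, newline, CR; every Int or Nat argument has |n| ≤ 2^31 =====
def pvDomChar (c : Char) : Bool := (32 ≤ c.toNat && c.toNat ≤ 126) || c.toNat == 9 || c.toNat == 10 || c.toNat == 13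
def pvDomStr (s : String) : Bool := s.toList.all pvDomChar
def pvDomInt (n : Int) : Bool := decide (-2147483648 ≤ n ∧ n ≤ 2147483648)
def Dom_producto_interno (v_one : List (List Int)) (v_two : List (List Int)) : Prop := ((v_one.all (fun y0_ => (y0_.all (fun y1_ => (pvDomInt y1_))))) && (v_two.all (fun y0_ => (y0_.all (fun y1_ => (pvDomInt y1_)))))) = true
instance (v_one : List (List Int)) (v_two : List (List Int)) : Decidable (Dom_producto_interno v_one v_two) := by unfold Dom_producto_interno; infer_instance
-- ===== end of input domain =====

-- B replaces A's two staged loops (conjugate-list build, then an indexed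
-- suma/multi fold) by one zip of the vectors and two componentwise sums
-- (idiomatic; same cost).


-- ===== PORT A =====
def pvSuma (cu cd : List Int) : List Int :=
  [PySem.List.pyGetD cu 0 0 + PySem.List.pyGetD cd 0 0,
   PySem.List.pyGetD cu 1 0 + PySem.List.pyGetD cd 1 0]

def pvMulti (cu cd : List Int) : List Int :=
  [PySem.List.pyGetD cu 0 0 * PySem.List.pyGetD cd 0 0 -
     PySem.List.pyGetD cu 1 0 * PySem.List.pyGetD cd 1 0,
   PySem.List.pyGetD cu 0 0 * PySem.List.pyGetD cd 1 0 +
     PySem.List.pyGetD cu 1 0 * PySem.List.pyGetD cd 0 0]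

def pvConju (c : List Int) : List Int :=
  [PySem.List.pyGetD c 0 0, PySem.List.pyGetD c 1 0 * -1]

def producto_interno (v_one : List (List Int)) (v_two : List (List Int)) : List Int :=
  let conju_v_one := v_one.foldl (fun acc i => acc ++ [pvConju i]) []
  (PySem.List.pyRange 0 (v_one.length : Int) 1).foldl
    (fun r j =>
      pvSuma r (pvMulti (PySem.List.pyGetD conju_v_one j []) (PySem.List.pyGetD v_two j [])))
    [0, 0]

-- ===== PORT B =====
def producto_interno_alt (v_one : List (List Int)) (v_two : List (List Int)) : List Int :=
  let pairs := List.zip v_one v_two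
  let real := (pairs.map (fun p =>
    PySem.List.pyGetD p.1 0 0 * PySem.List.pyGetD p.2 0 0 +
    PySem.List.pyGetD p.1 1 0 * PySem.List.pyGetD p.2 1 0)).sum
  let imag := (pairs.map (fun p =>
    PySem.List.pyGetD p.1 0 0 * PySem.List.pyGetD p.2 1 0 -
    PySem.List.pyGetD p.1 1 0 * PySem.List.pyGetD p.2 0 0)).sum
  [real, imag]

-- ===== PRECONDITION & SPEC =====
-- Pre_ excludes exactly the inputs where Python A raises IndexError: a v_two
-- shorter than v_one, or a used entry of either vector with fewer than 2 components.
def Pre_producto_interno (v_one : List (List Int)) (v_two : List (List Int)) : Prop :=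
  v_one.length ≤ v_two.length ∧
  (∀ x ∈ v_one, 2 ≤ x.length) ∧
  (∀ y ∈ v_two.take v_one.length, 2 ≤ y.length)
instance (v_one : List (List Int)) (v_two : List (List Int)) : Decidable (Pre_producto_interno v_one v_two) := by unfold Pre_producto_interno; infer_instance

def pvWitness_producto_interno : List (List Int) × List (List Int) :=
  ([[1, 2], [3, 4]], [[5, 6], [7, 8]])

def Spec_producto_interno (v_one : List (List Int)) (v_two : List (List Int)) (out : List Int) : Prop := out = producto_interno_alt v_one v_two
instance (v_one : List (List Int)) (v_two : List (List Int)) (out : List Int) : Decidable (Spec_producto_interno v_one v_two out) := by unfold Spec_producto_interno; infer_instance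

-- ===== CLAIM (what is proved, stated in full; the proofs are below) =====
def Claim_equal_producto_interno : Prop := ∀ (v_one : List (List Int)) (v_two : List (List Int)), Dom_producto_interno v_one v_two → Pre_producto_interno v_one v_two → Spec_producto_interno v_one v_two (producto_interno v_one v_two)

-- ===== LEMMAS AND PROOFS =====

-- The per-index real and imaginary contributions (proof-only abbreviations).
def fRe (x y : List Int) : Int :=
  PySem.List.pyGetD x 0 0 * PySem.List.pyGetD y 0 0 +
  PySem.List.pyGetD x 1 0 * PySem.List.pyGetD y 1 0
def fIm (x y : List Int) : Int :=
  PySem.List.pyGetD x 0 0 * PySem.List.pyGetD y 1 0 -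
  PySem.List.pyGetD x 1 0 * PySem.List.pyGetD y 0 0

-- A's first loop builds the conjugate list; it is the map of pvConju.
theorem conju_list_eq_map (v : List (List Int)) :
    v.foldl (fun acc i => acc ++ [pvConju i]) [] = v.map pvConju := by
  simpa using PySem.List.foldl_append_singleton_eq_map pvConju v []

-- One loop step of A, at an in-range index, adds the two scalar contributions.
theorem step_eq (v_one v_two : List (List Int)) (j x y : Int)
    (hj0 : 0 ≤ j) (hj1 : j < (v_one.length : Int)) (hj2 : j < (v_two.length : Int)) :
    pvSuma [x, y] (pvMulti (PySem.List.pyGetD (v_one.map pvConju) j [])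
        (PySem.List.pyGetD v_two j []))
    = [x + fRe (PySem.List.pyGetD v_one j []) (PySem.List.pyGetD v_two j []),
       y + fIm (PySem.List.pyGetD v_one j []) (PySem.List.pyGetD v_two j [])] := by
  rw [PySem.List.pyGetD_eq_getElem (v_one.map pvConju) ([] : List Int) hj0 (by simpa using hj1),
      PySem.List.pyGetD_eq_getElem v_one ([] : List Int) hj0 hj1,
      PySem.List.pyGetD_eq_getElem v_two ([] : List Int) hj0 hj2]
  simp only [List.getElem_map, pvSuma, pvMulti, pvConju, fRe, fIm]
  simp only [pysem, List.getD_cons_succ, List.getD_cons_zero]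
  simp only [List.cons.injEq, and_true]
  constructor <;> ring

-- A's second loop, run over any in-range index list, accumulates the two sums.
theorem loop_sum (v_one v_two : List (List Int)) :
    ∀ (js : List Int), (∀ j ∈ js, 0 ≤ j ∧ j < (v_one.length : Int) ∧ j < (v_two.length : Int)) →
    ∀ (x y : Int),
      js.foldl
        (fun r j =>
          pvSuma r (pvMulti (PySem.List.pyGetD (v_one.map pvConju) j [])
            (PySem.List.pyGetD v_two j []))) [x, y]
      = [x + (js.map (fun j => fRe (PySem.List.pyGetD v_one j []) (PySem.List.pyGetD v_two j []))).sum,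
         y + (js.map (fun j => fIm (PySem.List.pyGetD v_one j []) (PySem.List.pyGetD v_two j []))).sum] := by
  intro js
  induction js with
  | nil => intro _ x y; simp
  | cons j js ih =>
    intro hmem x y
    obtain ⟨hj0, hj1, hj2⟩ := hmem j (List.mem_cons_self ..)
    simp only [List.foldl_cons]
    rw [step_eq v_one v_two j x y hj0 hj1 hj2,
        ih (fun k hk => hmem k (List.mem_cons_of_mem _ hk))]
    simp [add_assoc]

-- Indexed sums over range(len v_one) equal the sums over the zip (v_one at most as long).
theorem sum_range_eq_sum_zip (f : List Int → List Int → Int) :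
    ∀ (v_one v_two : List (List Int)), v_one.length ≤ v_two.length →
    ((List.range v_one.length).map (fun k => f (v_one.getD k []) (v_two.getD k []))).sum
      = ((List.zip v_one v_two).map (fun p => f p.1 p.2)).sum := by
  intro v_one
  induction v_one with
  | nil => intro v_two _; simp
  | cons x xs ih =>
    intro v_two hlen
    cases v_two with
    | nil => simp at hlen
    | cons y ys =>
      simp only [List.length_cons, List.range_succ_eq_map, List.map_cons, List.map_map,
        List.sum_cons, List.zip_cons_cons]
      have := ih ys (by simpa using hlen)
      simp only [Function.comp_def, List.getD_cons_succ, List.getD_cons_zero]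
      rw [this]

-- ===== VERDICT (by name: the statement is the Claim_ definition above) =====
theorem producto_interno_spec : Claim_equal_producto_interno := by
  intro v_one v_two _ hpre
  unfold Spec_producto_interno producto_interno producto_interno_alt
  rw [conju_list_eq_map]
  rw [loop_sum v_one v_two _ (fun j hj => by
    have h := (PySem.List.mem_pyRange_one).1 hj
    refine ⟨h.1, h.2, ?_⟩
    have : (v_one.length : Int) ≤ (v_two.length : Int) := by exact_mod_cast hpre.1
    omega)]
  have hrw : ∀ (f : List Int → List Int → Int),
      ((PySem.List.pyRange 0 (v_one.length : Int) 1).map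
        (fun j => f (PySem.List.pyGetD v_one j []) (PySem.List.pyGetD v_two j []))).sum
      = ((List.zip v_one v_two).map (fun p => f p.1 p.2)).sum := by
    intro f
    rw [PySem.List.pyRange_one]
    simp only [List.map_map, Function.comp_def, zero_add, Int.sub_zero, Int.toNat_natCast,
      PySem.List.pyGetD_natCast]
    exact sum_range_eq_sum_zip f v_one v_two hpre.1
  rw [hrw fRe, hrw fIm]
  simp [fRe, fIm]
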